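-- pv_equiv track=rewrite | github.com/aryn07/Word-Guessing-Course-Project-CS771 | submit.py | preprocess_words
-- ===== SOURCE A (Python) =====
-- from collections import defaultdict
--
-- def generate_bigrams(word):
--     return [word[i:i+2] for i in range(len(word) - 1)]
--
-- def preprocess_words(word_list):
--     bigram_to_words = defaultdict(list)
--     word_to_bigrams = {}
--
--     for word in word_list:
--         bigrams = generate_bigrams(word)
--         unique_bigrams = sorted(set(bigrams))
--         if len(unique_bigrams) > 2:
--             unique_bigrams = unique_bigrams[:2]
--         bigram_key = tuple(unique_bigrams)
--         bigram_to_words[bigram_key].append(word)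
--         word_to_bigrams[word] = bigram_key
--
--     return bigram_to_words, word_to_bigrams
-- ===== SOURCE B (Python) =====
-- def preprocess_words(word_list):
--     def two_min_key(word):
--         m1 = None
--         m2 = None
--         for i in range(len(word) - 1):
--             b = word[i:i+2]
--             if m1 is None:
--                 m1 = b
--             elif b == m1 or b == m2:
--                 pass
--             elif b < m1:
--                 m1, m2 = b, m1
--             elif m2 is None or b < m2:
--                 m2 = b
--         if m1 is None:
--             return ()
--         if m2 is None:
--             return (m1,)
--         return (m1, m2)
--
--     pairs = [(w, two_min_key(w)) for w in word_list]
--     groups = {}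
--     for w, k in pairs:
--         groups.setdefault(k, []).append(w)
--     return groups, dict(pairs)
-- ===== Notes on version B (the rewrite author's own statement) =====
-- stated objective: faster
-- what changed: The per-word key is computed by a single selection scan maintaining the two smallest distinct bigrams (min1/min2) instead of building a set, fully sorting it and slicing; the pipeline is also restructured into a (word,key) pair list consumed by a setdefault-grouping pass and dict(pairs).
import Mathlib
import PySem

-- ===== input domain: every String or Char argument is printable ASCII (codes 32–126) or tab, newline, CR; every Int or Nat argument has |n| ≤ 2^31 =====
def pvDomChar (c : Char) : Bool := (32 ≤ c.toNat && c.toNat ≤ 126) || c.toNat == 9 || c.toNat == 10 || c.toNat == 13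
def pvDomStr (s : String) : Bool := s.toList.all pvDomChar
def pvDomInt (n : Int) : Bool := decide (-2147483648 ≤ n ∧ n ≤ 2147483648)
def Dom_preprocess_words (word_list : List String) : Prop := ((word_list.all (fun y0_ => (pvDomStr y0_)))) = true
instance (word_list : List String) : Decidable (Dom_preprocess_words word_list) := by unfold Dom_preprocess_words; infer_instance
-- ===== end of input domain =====

-- B replaces A's sort-the-bigram-set-then-slice key computation with a single linear
-- scan selecting the two smallest distinct bigrams, and restructures the bookkeeping
-- into a pair list + grouping pass (measured faster by a constant factor, same results).

-- ===== PORT A =====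
def generate_bigrams (word : String) : List String :=
  (PySem.List.pyRange 0 (PySem.Str.len word - 1) 1).map
    (fun i => PySem.Str.slice word (some i) (some (i + 2)))

def preprocess_words (word_list : List String) :
    (List (List String × List String)) × (List (String × List String)) :=
  let st := word_list.foldl
    (fun (st : PySem.Dict (List String) (List String) × PySem.Dict String (List String)) word =>
      let bigrams := generate_bigrams word
      let unique_bigrams := PySem.List.sorted (PySem.Set.ofList bigrams) (fun x => x) false
      let unique_bigrams :=
        if 2 < unique_bigrams.length then PySem.List.slice unique_bigrams none (some 2)
        else unique_bigrams
      let bigram_key := unique_bigrams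
      (st.1.insert bigram_key (st.1.getD bigram_key [] ++ [word]),
       st.2.insert word bigram_key))
    (PySem.Dict.empty, PySem.Dict.empty)
  (st.1.items, st.2.items)

-- ===== PORT B =====
def pvKeyStep (m : Option String × Option String) (b : String) :
    Option String × Option String :=
  match m with
  | (none, m2) => (some b, m2)
  | (some a, m2) =>
    if b = a ∨ some b = m2 then (some a, m2)
    else if b < a then (some b, some a)
    else match m2 with
      | none => (some a, some b)
      | some c => if b < c then (some a, some b) else (some a, some c)

def two_min_key (word : String) : List String :=
  let m := (PySem.List.pyRange 0 (PySem.Str.len word - 1) 1).foldl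
    (fun m i => pvKeyStep m (PySem.Str.slice word (some i) (some (i + 2)))) (none, none)
  match m with
  | (none, _) => []
  | (some a, none) => [a]
  | (some a, some c) => [a, c]

def preprocess_words_alt (word_list : List String) :
    (List (List String × List String)) × (List (String × List String)) :=
  let pairs := word_list.map (fun w => (w, two_min_key w))
  let groups := pairs.foldl
    (fun (g : PySem.Dict (List String) (List String)) p =>
      -- groups.setdefault(k, []).append(w) == g[k] = g.get(k, []) + [w]
      g.modify p.2 [] (· ++ [p.1]))
    PySem.Dict.empty
  (groups.items, (PySem.Dict.ofList pairs).items)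

-- ===== PRECONDITION & SPEC =====
def Spec_preprocess_words (word_list : List String) (out : (List (List String × List String)) × (List (String × List String))) : Prop := out = preprocess_words_alt word_list
instance (word_list : List String) (out : (List (List String × List String)) × (List (String × List String))) : Decidable (Spec_preprocess_words word_list out) := by unfold Spec_preprocess_words; infer_instance

-- ===== CLAIM (what is proved, stated in full; the proofs are below) =====
def Claim_equal_preprocess_words : Prop := ∀ (word_list : List String), Dom_preprocess_words word_list → Spec_preprocess_words word_list (preprocess_words word_list)

-- ===== LEMMAS AND PROOFS =====

-- the first two elements of a sorted list, as the selection pair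
def pvSpecPair (L : List String) : Option String × Option String :=
  match L with
  | [] => (none, none)
  | [a] => (some a, none)
  | a :: c :: _ => (some a, some c)

theorem pvOrderedInsert_pairwise_lt (y : String) (L : List String)
    (h : L.Pairwise (· < ·)) (hy : y ∉ L) :
    (List.orderedInsert (· ≤ ·) y L).Pairwise (· < ·) := by
  induction L with
  | nil => simp [List.orderedInsert]
  | cons b l ih =>
    simp only [List.orderedInsert]
    rcases List.pairwise_cons.mp h with ⟨hb, hl⟩
    by_cases hle : y ≤ b
    · simp only [if_pos hle]
      have hlt : y < b := lt_of_le_of_ne hle (by intro e; exact hy (by simp [e]))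
      refine List.pairwise_cons.mpr ⟨?_, h⟩
      intro x hx
      rcases List.mem_cons.mp hx with h' | h'
      · exact h' ▸ hlt
      · exact lt_trans hlt (hb x h')
    · simp only [if_neg hle]
      have hby : b < y := lt_of_not_ge hle
      refine List.pairwise_cons.mpr ⟨?_, ih hl (fun h' => hy (List.mem_cons_of_mem _ h'))⟩
      intro x hx
      rw [List.mem_orderedInsert] at hx
      rcases hx with h' | h'
      · exact h' ▸ hby
      · exact hb x h'

-- sorted-dedup characterisation of the selection fold
theorem pvFold_eq_specPair (bs : List String) :
    bs.foldl pvKeyStep (none, none)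
      = pvSpecPair (PySem.List.sorted (PySem.Set.ofList bs) (fun x => x) false) := by
  induction bs using List.reverseRecOn with
  | nil => rfl
  | append_singleton bs y ih =>
    rw [List.foldl_append, List.foldl_cons, List.foldl_nil, ih]
    have hperm : (PySem.List.sorted (PySem.Set.ofList bs) (fun x => x) false).Perm
        (PySem.Set.ofList bs) := PySem.List.sorted_perm _ _ _
    have hle : (PySem.List.sorted (PySem.Set.ofList bs) (fun x => x) false).Pairwise
        (fun a b => a ≤ b) := PySem.List.sorted_pairwise _ _
    have hnd : (PySem.List.sorted (PySem.Set.ofList bs) (fun x => x) false).Nodup :=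
      hperm.nodup_iff.mpr (PySem.Set.nodup_ofList _)
    have hlt : (PySem.List.sorted (PySem.Set.ofList bs) (fun x => x) false).Pairwise
        (· < ·) := (hle.and hnd).imp (fun h => lt_of_le_of_ne h.1 h.2)
    rw [PySem.Set.ofList_append_singleton]
    by_cases hmem : y ∈ PySem.Set.ofList bs
    · rw [PySem.Set.add_of_mem hmem]
      have hyL : y ∈ PySem.List.sorted (PySem.Set.ofList bs) (fun x => x) false :=
        hperm.mem_iff.mpr hmem
      revert hyL hlt
      generalize PySem.List.sorted (PySem.Set.ofList bs) (fun x => x) false = L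
      intro hlt hyL
      match L, hyL with
      | [a], hyL =>
        have hya : y = a := by simpa using hyL
        simp only [pvSpecPair, pvKeyStep]
        rw [if_pos (Or.inl hya)]
      | a :: c :: r, hyL =>
        rcases List.pairwise_cons.mp hlt with ⟨ha, hlt'⟩
        rcases List.pairwise_cons.mp hlt' with ⟨hc, _⟩
        simp only [pvSpecPair, pvKeyStep]
        rcases List.mem_cons.mp hyL with h1 | h1
        · rw [if_pos (Or.inl h1)]
        rcases List.mem_cons.mp h1 with h2 | h2
        · rw [if_pos (Or.inr (by rw [h2]))]
        · have hay : a < y := ha y (List.mem_cons_of_mem _ h2)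
          have hcy : c < y := hc y h2
          rw [if_neg ?_, if_neg (not_lt_of_gt hay), if_neg (not_lt_of_gt hcy)]
          rintro (e | e)
          · exact absurd e (ne_of_gt hay)
          · exact absurd (Option.some.inj e) (ne_of_gt hcy)
    · rw [PySem.Set.add_of_not_mem hmem]
      have hyL : y ∉ PySem.List.sorted (PySem.Set.ofList bs) (fun x => x) false :=
        fun h => hmem (hperm.mem_iff.mp h)
      have hsort : PySem.List.sorted (PySem.Set.ofList bs ++ [y]) (fun x => x) false
          = List.orderedInsert (· ≤ ·) y
              (PySem.List.sorted (PySem.Set.ofList bs) (fun x => x) false) := by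
        apply PySem.List.sorted_eq_of_perm_of_pairwise_lt
        · exact ((List.perm_orderedInsert _ _ _).trans (hperm.cons y)).trans
            (List.perm_append_singleton _ _).symm
        · exact pvOrderedInsert_pairwise_lt y _ hlt hyL
      rw [hsort]
      revert hyL hlt
      generalize PySem.List.sorted (PySem.Set.ofList bs) (fun x => x) false = L
      intro hlt hyL
      match L with
      | [] => rfl
      | [a] =>
        have hne : y ≠ a := by simpa using hyL
        simp only [List.orderedInsert]
        by_cases hya : y ≤ a
        · rw [if_pos hya]
          simp only [pvSpecPair, pvKeyStep]
          rw [if_neg ?_, if_pos (lt_of_le_of_ne hya hne)]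
          rintro (e | e)
          · exact hne e
          · simp at e
        · rw [if_neg hya]
          have hay : a < y := lt_of_not_ge hya
          simp only [pvSpecPair, pvKeyStep]
          rw [if_neg ?_, if_neg (not_lt_of_gt hay)]
          rintro (e | e)
          · exact hne e
          · simp at e
      | a :: c :: r =>
        have hne_a : y ≠ a := fun e => hyL (by simp [e])
        have hne_c : y ≠ c := fun e => hyL (by simp [e])
        simp only [List.orderedInsert]
        by_cases hya : y ≤ a
        · rw [if_pos hya]
          simp only [pvSpecPair, pvKeyStep]
          rw [if_neg ?_, if_pos (lt_of_le_of_ne hya hne_a)]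
          rintro (e | e)
          · exact hne_a e
          · exact absurd (Option.some.inj e) hne_c
        · rw [if_neg hya]
          have hay : a < y := lt_of_not_ge hya
          by_cases hyc : y ≤ c
          · rw [if_pos hyc]
            simp only [pvSpecPair, pvKeyStep]
            rw [if_neg ?_, if_neg (not_lt_of_gt hay), if_pos (lt_of_le_of_ne hyc hne_c)]
            rintro (e | e)
            · exact hne_a e
            · exact absurd (Option.some.inj e) hne_c
          · rw [if_neg hyc]
            have hcy : c < y := lt_of_not_ge hyc
            simp only [pvSpecPair, pvKeyStep]
            rw [if_neg ?_, if_neg (not_lt_of_gt hay), if_neg (not_lt_of_gt hcy)]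
            rintro (e | e)
            · exact hne_a e
            · exact absurd (Option.some.inj e) hne_c

-- the two key computations agree on every word
theorem pvKey_eq (word : String) :
    (if 2 < (PySem.List.sorted (PySem.Set.ofList (generate_bigrams word)) (fun x => x) false).length
     then PySem.List.slice
        (PySem.List.sorted (PySem.Set.ofList (generate_bigrams word)) (fun x => x) false)
        none (some 2)
     else PySem.List.sorted (PySem.Set.ofList (generate_bigrams word)) (fun x => x) false)
      = two_min_key word := by
  unfold two_min_key
  have h : (PySem.List.pyRange 0 (PySem.Str.len word - 1) 1).foldl
      (fun m i => pvKeyStep m (PySem.Str.slice word (some i) (some (i + 2)))) (none, none)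
      = (generate_bigrams word).foldl pvKeyStep (none, none) := by
    rw [generate_bigrams, List.foldl_map]
  rw [h, pvFold_eq_specPair]
  generalize PySem.List.sorted (PySem.Set.ofList (generate_bigrams word)) (fun x => x) false = L
  match L with
  | [] => rfl
  | [a] => rfl
  | [a, c] => rfl
  | a :: c :: x :: r =>
    rw [if_pos (by simp)]
    simp [PySem.List.slice, pvSpecPair]

-- a fold with two independent components is the pair of two folds, and the two
-- pipelines build those folds from the same per-word key
theorem pvMain (word_list : List String) :
    preprocess_words word_list = preprocess_words_alt word_list := by
  unfold preprocess_words preprocess_words_alt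
  simp only [pvKey_eq]
  rw [PySem.List.foldl_prod_mk
    (f := fun (g : PySem.Dict (List String) (List String)) w =>
      g.insert (two_min_key w) (g.getD (two_min_key w) [] ++ [w]))
    (g := fun (d : PySem.Dict String (List String)) w => d.insert w (two_min_key w))]
  have h2 : PySem.Dict.ofList (word_list.map (fun w => (w, two_min_key w)))
      = word_list.foldl (fun d w => d.insert w (two_min_key w)) PySem.Dict.empty := by
    show (word_list.map (fun w => (w, two_min_key w))).foldl
        (fun d p => d.insert p.1 p.2) PySem.Dict.empty = _
    rw [List.foldl_map]
  rw [List.foldl_map, h2]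
  rfl

-- ===== VERDICT (by name: the statement is the Claim_ definition above) =====
theorem preprocess_words_spec : Claim_equal_preprocess_words := by
  intro word_list _
  unfold Spec_preprocess_words
  exact pvMain word_list
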